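-- pv_equiv track=rewrite | github.com/whiteskull20/WEBIR-Final | ppr4env_music_retrieval.py | _group_query_events
-- ===== SOURCE A (Python) =====
-- from collections import defaultdict, Counter
--
-- def _group_query_events(events):
--     """分組查詢事件"""
--     if not events:
--         return []
--
--     grouped = defaultdict(list)
--     for onset_time, pitch in events:
--         grouped[onset_time].append(pitch)
--
--     result = []
--     for onset_time in sorted(grouped.keys()):
--         pitches = sorted(grouped[onset_time])
--         result.append((onset_time, pitches))
--
--     return result
-- ===== SOURCE B (Python) =====
-- def _group_query_events(events):
--     onsets = sorted(set(t for t, _ in events))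
--     return [(t, sorted(p for s, p in events if s == t)) for t in onsets]
-- ===== Notes on version B (the rewrite author's own statement) =====
-- stated objective: simpler
-- what changed: B drops the defaultdict bucketing and per-group sort entirely: it sorts the distinct onset times once and builds each group's pitch list by filtering the events for that onset, as a single two-line comprehension.
import Mathlib
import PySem

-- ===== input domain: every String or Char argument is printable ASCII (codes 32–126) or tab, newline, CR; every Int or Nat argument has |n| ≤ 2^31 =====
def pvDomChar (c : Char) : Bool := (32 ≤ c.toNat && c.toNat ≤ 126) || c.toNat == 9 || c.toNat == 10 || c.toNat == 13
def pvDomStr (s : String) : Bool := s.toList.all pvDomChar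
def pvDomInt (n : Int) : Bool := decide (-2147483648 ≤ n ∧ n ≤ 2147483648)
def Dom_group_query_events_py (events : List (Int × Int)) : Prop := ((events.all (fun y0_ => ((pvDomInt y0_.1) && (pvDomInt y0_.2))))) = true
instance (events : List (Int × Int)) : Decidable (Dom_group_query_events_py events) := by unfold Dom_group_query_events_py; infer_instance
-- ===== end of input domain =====

-- B replaces the defaultdict bucketing + per-group sort by sorting the distinct onsets once and filtering the events per onset (simpler; return value only).
-- ===== PORT A =====
def group_query_events_py (events : List (Int × Int)) : List (Int × List Int) :=
  if events = [] then []
  else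
    let grouped := events.foldl (fun d p => d.modify p.1 [] (fun l => l ++ [p.2])) PySem.Dict.empty
    (PySem.List.sorted grouped.keys (fun k => k) false).foldl
      (fun res k => res ++ [(k, PySem.List.sorted (grouped.getD k []) (fun x => x) false)]) []

-- ===== PORT B =====
def group_query_events_py_alt (events : List (Int × Int)) : List (Int × List Int) :=
  (PySem.List.sorted (PySem.Set.ofList (events.map (fun p => p.1))) (fun k => k) false).map
    (fun t => (t, PySem.List.sorted ((events.filter (fun p => p.1 == t)).map (fun p => p.2)) (fun x => x) false))

-- ===== PRECONDITION & SPEC =====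
def Spec_group_query_events_py (events : List (Int × Int)) (out : List (Int × List Int)) : Prop := out = group_query_events_py_alt events
instance (events : List (Int × Int)) (out : List (Int × List Int)) : Decidable (Spec_group_query_events_py events out) := by unfold Spec_group_query_events_py; infer_instance

-- ===== CLAIM (what is proved, stated in full; the proofs are below) =====
def Claim_equal_group_query_events_py : Prop := ∀ (events : List (Int × Int)), Dom_group_query_events_py events → Spec_group_query_events_py events (group_query_events_py events)

-- ===== LEMMAS AND PROOFS =====

-- ===== VERDICT (by name: the statement is the Claim_ definition above) =====
theorem group_query_events_py_spec : Claim_equal_group_query_events_py := by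
  intro events _
  unfold Spec_group_query_events_py group_query_events_py group_query_events_py_alt
  by_cases h : events = []
  · subst h; rfl
  · simp only [if_neg h]
    rw [PySem.List.foldl_append_singleton_eq_map, List.nil_append]
    rw [show (events.foldl (fun d p => d.modify p.1 [] (fun l => l ++ [p.2])) PySem.Dict.empty).keys
          = PySem.Set.ofList (events.map (fun p => p.1)) from by
      rw [PySem.Dict.keys_foldl_modify_key]; rfl]
    refine List.map_congr_left (fun k _ => ?_)
    rw [PySem.Dict.getD_foldl_modify_append]
    rfl
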